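-- pv_equiv track=rewrite | github.com/yoka255/ProjectEuler | 0-99/98.py | work
-- ===== SOURCE A (Python) =====
-- def work(w, t, k):
-- 	n = len(w)
-- 	if n != len(t) or n != len(k):
-- 		return "2"
-- 	for i in range(n):
-- 		for j in range(n):
-- 			if w[i] != w[j] and k[i] == k[j]:
-- 				return "2"
-- 			if w[i] == w[j] and k[i] != k[j]:
-- 				return "2"
-- 	ret = ""
-- 	for i in range(n):
-- 		for j in range(n):
-- 			if t[i] == w[j]:
-- 				ret += k[j]
-- 				break
-- 	return ret
-- ===== SOURCE B (Python) =====
-- def work(w, t, k):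
--     if len(w) != len(t) or len(w) != len(k):
--         return "2"
--     d = {}
--     r = {}
--     for a, b in zip(w, k):
--         if a in d:
--             if d[a] != b:
--                 return "2"
--         elif b in r:
--             return "2"
--         else:
--             d[a] = b
--             r[b] = a
--     return ''.join(d[c] for c in t if c in d)
-- ===== Notes on version B (the rewrite author's own statement) =====
-- stated objective: faster
-- what changed: Replaced the O(n^2) all-pairs consistency scan and the per-character linear search with a single pass that builds a forward and a reverse dictionary (rejecting on the first mapping conflict) and then translates t by direct dictionary lookup.
import Mathlib
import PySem

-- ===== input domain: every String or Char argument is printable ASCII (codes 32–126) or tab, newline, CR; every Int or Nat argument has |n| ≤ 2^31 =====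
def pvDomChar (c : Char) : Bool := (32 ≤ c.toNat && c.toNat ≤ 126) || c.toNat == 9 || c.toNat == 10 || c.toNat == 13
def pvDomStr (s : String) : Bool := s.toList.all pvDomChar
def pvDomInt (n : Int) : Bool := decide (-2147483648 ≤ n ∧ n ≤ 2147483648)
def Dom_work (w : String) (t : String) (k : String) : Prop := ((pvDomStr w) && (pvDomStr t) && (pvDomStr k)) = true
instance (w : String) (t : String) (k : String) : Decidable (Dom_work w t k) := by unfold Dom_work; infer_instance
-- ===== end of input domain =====

-- B replaces A's all-pairs consistency scan and per-character linear search by a single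
-- pass that builds a forward and a reverse dictionary, then translates by direct lookup
-- (objective: faster).

-- ===== PORT A =====
-- All indices come from `range n` and are nonnegative and in range, so Python's w[i] is
-- ported as the list lookup wl[i]? (equal to PySem.List.pyGet? at a natural index);
-- character comparisons become comparisons of the Option values (exact, both are `some`).
def work (w : String) (t : String) (k : String) : String :=
  let wl := w.toList
  let tl := t.toList
  let kl := k.toList
  if wl.length ≠ tl.length ∨ wl.length ≠ kl.length then "2"
  else if (List.range wl.length).any (fun i => (List.range wl.length).any (fun j =>
      decide ((wl[i]? ≠ wl[j]? ∧ kl[i]? = kl[j]?) ∨ (wl[i]? = wl[j]? ∧ kl[i]? ≠ kl[j]?)))) then "2"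
  else String.mk ((List.range wl.length).foldl (fun ret i =>
      match (List.range wl.length).find? (fun j => tl[i]? == wl[j]?) with
      | some j => ret ++ (kl[j]?).toList
      | none => ret) [])

-- ===== PORT B =====
-- The `for a, b in zip(w, k)` loop of Source B with its three early-exit branches;
-- `none` is the loop's `return "2"`.
def workAltLoop : List (Char × Char) → PySem.Dict Char Char → PySem.Dict Char Char →
    Option (PySem.Dict Char Char)
  | [], d, _ => some d
  | (a, b) :: rest, d, r =>
    match d.get? a with
    | some b' => if b' ≠ b then none else workAltLoop rest d r
    | none =>
      match r.get? b with
      | some _ => none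
      | none => workAltLoop rest (d.insert a b) (r.insert b a)

def work_alt (w : String) (t : String) (k : String) : String :=
  let wl := w.toList
  let tl := t.toList
  let kl := k.toList
  if wl.length ≠ tl.length ∨ wl.length ≠ kl.length then "2"
  else match workAltLoop (wl.zip kl) PySem.Dict.empty PySem.Dict.empty with
    | none => "2"
    | some d => String.mk (tl.filterMap (fun c => d.get? c))

-- ===== PRECONDITION & SPEC =====
def Spec_work (w : String) (t : String) (k : String) (out : String) : Prop := out = work_alt w t k
instance (w : String) (t : String) (k : String) (out : String) : Decidable (Spec_work w t k out) := by unfold Spec_work; infer_instance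

-- ===== CLAIM (what is proved, stated in full; the proofs are below) =====
def Claim_equal_work : Prop := ∀ (w : String) (t : String) (k : String), Dom_work w t k → Spec_work w t k (work w t k)

-- ===== LEMMAS AND PROOFS =====


def Conf (p q : Char × Char) : Prop := (p.1 ≠ q.1 ∧ p.2 = q.2) ∨ (p.1 = q.1 ∧ p.2 ≠ q.2)

def GoodAll (l : List (Char × Char)) : Prop := ∀ p ∈ l, ∀ q ∈ l, ¬ Conf p q

lemma altLoop_spec : ∀ (ps pre : List (Char × Char)) (d r : PySem.Dict Char Char),
    (∀ a b, d.get? a = some b ↔ (a, b) ∈ pre) →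
    (∀ a b, r.get? b = some a ↔ (a, b) ∈ pre) →
    GoodAll pre →
    (∀ d', workAltLoop ps d r = some d' →
        (GoodAll (pre ++ ps) ∧ ∀ a b, d'.get? a = some b ↔ (a, b) ∈ pre ++ ps)) ∧
    (workAltLoop ps d r = none → ¬ GoodAll (pre ++ ps)) := by
  intro ps
  induction ps with
  | nil =>
    intro pre d r hd hr hg
    refine ⟨fun d' h => ?_, fun h => by simp [workAltLoop] at h⟩
    simp only [workAltLoop, Option.some.injEq] at h
    subst h
    simpa using ⟨hg, hd⟩
  | cons p rest ih =>
    obtain ⟨a, b⟩ := p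
    intro pre d r hd hr hg
    cases hda : d.get? a with
    | some b' =>
      simp only [workAltLoop, hda]
      have hmem : (a, b') ∈ pre := (hd a b').mp hda
      by_cases hbb : b' = b
      · subst hbb
        rw [if_neg (fun hc => hc rfl)]
        -- membership in pre ++ (a,b')::rest equals membership in pre ++ rest
        have hx : ∀ x : Char × Char, x ∈ pre ++ (a, b') :: rest ↔ x ∈ pre ++ rest := by
          intro x
          simp only [List.mem_append, List.mem_cons]
          constructor
          · rintro (h | h | h)
            · exact Or.inl h
            · exact Or.inl (h ▸ hmem)
            · exact Or.inr h
          · rintro (h | h)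
            · exact Or.inl h
            · exact Or.inr (Or.inr h)
        have hGx : GoodAll (pre ++ (a, b') :: rest) ↔ GoodAll (pre ++ rest) := by
          unfold GoodAll
          constructor
          · intro h p hp q hq; exact h p ((hx p).mpr hp) q ((hx q).mpr hq)
          · intro h p hp q hq; exact h p ((hx p).mp hp) q ((hx q).mp hq)
        obtain ⟨h1, h2⟩ := ih pre d r hd hr hg
        refine ⟨fun d' h => ?_, fun h => ?_⟩
        · obtain ⟨hg', hd'⟩ := h1 d' h
          exact ⟨hGx.mpr hg', fun x y => (hd' x y).trans (hx (x, y)).symm⟩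
        · exact fun hgg => h2 h (hGx.mp hgg)
      · simp only [ne_eq, hbb, not_false_eq_true, if_pos]
        refine ⟨fun d' h => by simp at h, fun _ hgg => ?_⟩
        have h1 : (a, b') ∈ pre ++ (a, b) :: rest := List.mem_append_left _ hmem
        have h2 : (a, b) ∈ pre ++ (a, b) :: rest := by simp
        exact hgg _ h1 _ h2 (Or.inr ⟨rfl, hbb⟩)
    | none =>
      simp only [workAltLoop, hda]
      have hnotd : ∀ y, (a, y) ∉ pre := fun y hy => by
        have := (hd a y).mpr hy; rw [hda] at this; simp at this
      cases hrb : r.get? b with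
      | some a' =>
        have hmem : (a', b) ∈ pre := (hr a' b).mp hrb
        have haa : a' ≠ a := fun h => hnotd b (h ▸ hmem)
        refine ⟨fun d' h => by simp at h, fun _ hgg => ?_⟩
        have h1 : (a', b) ∈ pre ++ (a, b) :: rest := List.mem_append_left _ hmem
        have h2 : (a, b) ∈ pre ++ (a, b) :: rest := by simp
        exact hgg _ h1 _ h2 (Or.inl ⟨haa, rfl⟩)
      | none =>
        have hnotr : ∀ x, (x, b) ∉ pre := fun x hx => by
          have := (hr x b).mpr hx; rw [hrb] at this; simp at this
        have hd' : ∀ x y, (d.insert a b).get? x = some y ↔ (x, y) ∈ pre ++ [(a, b)] := by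
          intro x y
          rw [PySem.Dict.get?_insert]
          by_cases hxa : x = a
          · subst hxa
            simp [hnotd y, eq_comm]
          · simp only [if_neg hxa, List.mem_append, hd x y, List.mem_cons]
            constructor
            · exact fun h => Or.inl h
            · rintro (h | h)
              · exact h
              · exact absurd h (by simp [hxa])
        have hr' : ∀ x y, (r.insert b a).get? y = some x ↔ (x, y) ∈ pre ++ [(a, b)] := by
          intro x y
          rw [PySem.Dict.get?_insert]
          by_cases hyb : y = b
          · subst hyb
            simp [hnotr x, eq_comm]
          · simp only [if_neg hyb, List.mem_append, hr x y, List.mem_cons]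
            constructor
            · exact fun h => Or.inl h
            · rintro (h | h)
              · exact h
              · exact absurd h (by simp [hyb])
        have hg' : GoodAll (pre ++ [(a, b)]) := by
          intro p hp q hq
          simp only [List.mem_append, List.mem_cons, List.not_mem_nil, or_false] at hp hq
          rcases hp with hp | hp <;> rcases hq with hq | hq
          · exact hg p hp q hq
          · subst hq
            rintro (⟨h1, h2⟩ | ⟨h1, h2⟩)
            · change p.2 = b at h2
              exact hnotr p.1 (by rw [← h2]; simpa using hp)
            · change p.1 = a at h1
              exact hnotd p.2 (by rw [← h1]; simpa using hp)
          · subst hp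
            rintro (⟨h1, h2⟩ | ⟨h1, h2⟩)
            · change b = q.2 at h2
              exact hnotr q.1 (by rw [h2]; simpa using hq)
            · change a = q.1 at h1
              exact hnotd q.2 (by rw [h1]; simpa using hq)
          · subst hp; subst hq
            rintro (⟨h1, _⟩ | ⟨_, h2⟩)
            · exact h1 rfl
            · exact h2 rfl
        obtain ⟨h1, h2⟩ := ih (pre ++ [(a, b)]) (d.insert a b) (r.insert b a) hd' hr' hg'
        have hassoc : pre ++ [(a, b)] ++ rest = pre ++ (a, b) :: rest := by simp
        rw [hassoc] at h1 h2
        exact ⟨h1, h2⟩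

lemma altLoop_none (ps : List (Char × Char))
    (h : workAltLoop ps PySem.Dict.empty PySem.Dict.empty = none) : ¬ GoodAll ps := by
  have := (altLoop_spec ps [] PySem.Dict.empty PySem.Dict.empty
    (by simp [PySem.Dict.get?_empty]) (by simp [PySem.Dict.get?_empty])
    (by intro p hp; simp at hp)).2 h
  simpa using this

lemma altLoop_some (ps : List (Char × Char)) (d : PySem.Dict Char Char)
    (h : workAltLoop ps PySem.Dict.empty PySem.Dict.empty = some d) :
    GoodAll ps ∧ ∀ a b, d.get? a = some b ↔ (a, b) ∈ ps := by
  have := (altLoop_spec ps [] PySem.Dict.empty PySem.Dict.empty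
    (by simp [PySem.Dict.get?_empty]) (by simp [PySem.Dict.get?_empty])
    (by intro p hp; simp at hp)).1 d h
  simpa using this

lemma Acheck_iff (wl kl : List Char) (hk : wl.length = kl.length) :
    ((List.range wl.length).any (fun i => (List.range wl.length).any (fun j =>
      decide ((wl[i]? ≠ wl[j]? ∧ kl[i]? = kl[j]?) ∨ (wl[i]? = wl[j]? ∧ kl[i]? ≠ kl[j]?)))) = false)
    ↔ GoodAll (wl.zip kl) := by
  have hzl : (wl.zip kl).length = wl.length := by simp [List.length_zip, hk]
  rw [← Bool.not_eq_true]
  simp only [List.any_eq_true, List.mem_range, decide_eq_true_eq, not_exists, not_and]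
  have key : ∀ (i j : ℕ) (hi : i < wl.length) (hj : j < wl.length),
      (¬((wl[i]? ≠ wl[j]? ∧ kl[i]? = kl[j]?) ∨ (wl[i]? = wl[j]? ∧ kl[i]? ≠ kl[j]?))
        ↔ ¬ Conf ((wl.zip kl)[i]'(by omega)) ((wl.zip kl)[j]'(by omega))) := by
    intro i j hi hj
    have hik : i < kl.length := hk ▸ hi
    have hjk : j < kl.length := hk ▸ hj
    have hgi := List.getElem_zip (l := wl) (l' := kl) (i := i) (h := by omega)
    have hgj := List.getElem_zip (l := wl) (l' := kl) (i := j) (h := by omega)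
    have hw : wl[i]? = wl[j]? ↔ wl[i] = wl[j] := by
      simp [hi, hj]
    have hkk : kl[i]? = kl[j]? ↔ kl[i] = kl[j] := by
      simp [hik, hjk]
    rw [hgi, hgj]
    simp only [Conf, not_or, not_and, ne_eq, hw, hkk]
  constructor
  · intro h p hp q hq
    obtain ⟨i, hi, hpi⟩ := List.mem_iff_getElem.mp hp
    obtain ⟨j, hj, hqj⟩ := List.mem_iff_getElem.mp hq
    rw [hzl] at hi hj
    subst hpi hqj
    exact (key i j hi hj).mp (h i hi j hj)
  · intro h i hi j hj
    exact (key i j hi hj).mpr (h _ (List.getElem_mem _) _ (List.getElem_mem _))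

lemma inner_eq (c : Char) : ∀ (wl kl : List Char), wl.length = kl.length →
    (match (List.range wl.length).find? (fun j => (some c : Option Char) == wl[j]?) with
     | some j => (kl[j]?).toList
     | none => ([] : List Char))
    = ((((wl.zip kl).find? (fun p => p.1 == c)).map (·.2)).toList) := by
  intro wl
  induction wl with
  | nil => intro kl h; simp
  | cons a wl ih =>
    intro kl h
    cases kl with
    | nil => simp at h
    | cons b kl =>
      have h' : wl.length = kl.length := by simpa using h
      rcases eq_or_ne a c with hac | hac
      · subst hac
        simp [List.range_succ_eq_map]
      · simp only [List.length_cons, List.range_succ_eq_map, List.zip_cons_cons]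
        rw [List.find?_cons_of_neg, List.find?_cons_of_neg, List.find?_map]
        · simp only [List.getElem?_cons_succ, Function.comp_def, Nat.succ_eq_add_one]
          cases ho : (List.range wl.length).find? (fun j => (some c : Option Char) == wl[j]?) with
          | none =>
            have := ih kl h'
            rw [ho] at this
            simp only [Option.map_none]
            simpa using this
          | some j =>
            have := ih kl h'
            rw [ho] at this
            simp only [Option.map_some]
            simpa using this
        · simpa using hac
        · simpa using Ne.symm hac

lemma find_zip_get (ps : List (Char × Char)) (d : PySem.Dict Char Char)
    (hd : ∀ a b, d.get? a = some b ↔ (a, b) ∈ ps) (c : Char) :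
    ((ps.find? (fun p => p.1 == c)).map (·.2)) = d.get? c := by
  cases hf : ps.find? (fun p => p.1 == c) with
  | none =>
    have hn := List.find?_eq_none.mp hf
    cases hg : d.get? c with
    | none => simp
    | some b =>
      have hm := (hd c b).mp hg
      have := hn _ hm
      simp at this
  | some p =>
    obtain ⟨pa, pb⟩ := p
    have hp := List.find?_some hf
    have hm := List.mem_of_find?_eq_some hf
    have hpa : pa = c := by simpa using hp
    subst hpa
    rw [(hd pa pb).mpr hm]
    rfl

lemma foldl_range_getElem {α β : Type} (g : List β → Option α → List β) :
    ∀ (l : List α) (init : List β),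
      (List.range l.length).foldl (fun acc i => g acc l[i]?) init
        = l.foldl (fun acc c => g acc (some c)) init := by
  intro l
  induction l with
  | nil => intro init; simp
  | cons c l ih =>
    intro init
    simp only [List.length_cons, List.range_succ_eq_map, List.foldl_cons, List.foldl_map,
      List.getElem?_cons_succ, List.getElem?_cons_zero]
    exact ih (g init (some c))

lemma foldl_toList_filterMap {α β : Type} (f : α → Option β) :
    ∀ (l : List α) (acc : List β),
      l.foldl (fun acc c => acc ++ (f c).toList) acc = acc ++ l.filterMap f := by
  intro l
  induction l with
  | nil => intro acc; simp
  | cons c l ih =>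
    intro acc
    simp only [List.foldl_cons, List.filterMap_cons]
    cases h : f c <;> simp [ih]

-- ===== VERDICT (by name: the statement is the Claim_ definition above) =====
theorem work_spec : Claim_equal_work := by
  intro w t k _
  unfold Spec_work work work_alt
  by_cases hlen : w.toList.length ≠ t.toList.length ∨ w.toList.length ≠ k.toList.length
  · rw [if_pos hlen, if_pos hlen]
  · rw [if_neg hlen, if_neg hlen]
    obtain ⟨h1, h2⟩ := not_or.mp hlen
    have ht : w.toList.length = t.toList.length := not_ne_iff.mp h1
    have hkk : w.toList.length = k.toList.length := not_ne_iff.mp h2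
    cases hloop : workAltLoop (w.toList.zip k.toList) PySem.Dict.empty PySem.Dict.empty with
    | none =>
      have hng := altLoop_none _ hloop
      rcases Bool.eq_false_or_eq_true ((List.range w.toList.length).any (fun i =>
          (List.range w.toList.length).any (fun j =>
          decide ((w.toList[i]? ≠ w.toList[j]? ∧ k.toList[i]? = k.toList[j]?) ∨
            (w.toList[i]? = w.toList[j]? ∧ k.toList[i]? ≠ k.toList[j]?))))) with htr | hf
      · rw [if_pos htr]
      · exact absurd ((Acheck_iff _ _ hkk).mp hf) hng
    | some d =>
      obtain ⟨hgood, hd⟩ := altLoop_some _ _ hloop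
      rw [if_neg (by rw [(Acheck_iff _ _ hkk).mpr hgood]; exact Bool.false_ne_true)]
      refine congrArg String.mk ?_
      have hbody : ∀ (acc : List Char) (c : Char),
          (match (List.range w.toList.length).find? (fun j => (some c : Option Char) == w.toList[j]?) with
            | some j => acc ++ (k.toList[j]?).toList
            | none => acc)
          = acc ++ ((d.get? c).toList) := by
        intro acc c
        have h1 := inner_eq c w.toList k.toList hkk
        rw [find_zip_get _ d hd c] at h1
        cases hf : (List.range w.toList.length).find? (fun j => (some c : Option Char) == w.toList[j]?) with
        | none =>
          rw [hf] at h1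
          have h1' : ([] : List Char) = (d.get? c).toList := h1
          show acc = acc ++ (d.get? c).toList
          rw [← h1', List.append_nil]
        | some j =>
          rw [hf] at h1
          have h1' : (k.toList[j]?).toList = (d.get? c).toList := h1
          show acc ++ (k.toList[j]?).toList = acc ++ (d.get? c).toList
          rw [h1']
      calc (List.range w.toList.length).foldl (fun ret i =>
              match (List.range w.toList.length).find? (fun j => t.toList[i]? == w.toList[j]?) with
              | some j => ret ++ (k.toList[j]?).toList
              | none => ret) []
          = (List.range t.toList.length).foldl (fun ret i =>
              (fun acc (oc : Option Char) => acc ++ ((oc.bind (fun c => d.get? c)).toList)) ret t.toList[i]?) [] := by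
            rw [← ht]
            apply PySem.List.foldl_congr_mem
            intro acc i hi
            rw [List.mem_range] at hi
            have hti : i < t.toList.length := ht ▸ hi
            rw [List.getElem?_eq_getElem hti]
            exact hbody acc _
        _ = t.toList.foldl (fun acc c =>
              (fun acc (oc : Option Char) => acc ++ ((oc.bind (fun c => d.get? c)).toList)) acc (some c)) [] :=
            foldl_range_getElem (fun acc oc => acc ++ ((oc.bind (fun c => d.get? c)).toList)) t.toList []
        _ = t.toList.filterMap (fun c => d.get? c) := by
            simpa using foldl_toList_filterMap (fun c => d.get? c) t.toList []
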